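-- pv_equiv track=rewrite | github.com/cropter42-bit/speechtyper | src/speech_typer/core/custom_words.py | _word_signature
-- ===== SOURCE A (Python) =====
-- def _word_signature(word: str) -> str:
--     if not word:
--         return ""
--     chars = [char for char in word.lower() if char.isalpha() or char.isdigit()]
--     if not chars:
--         return ""
--     head = chars[0]
--     tail = [char for char in chars[1:] if char not in "aeiouy"]
--     collapsed: list[str] = []
--     for char in tail:
--         if not collapsed or collapsed[-1] != char:
--             collapsed.append(char)
--     return head + "".join(collapsed[:6])
-- ===== SOURCE B (Python) =====
-- def _word_signature(word: str) -> str: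
--     head = None
--     last = None
--     sig = []
--     for char in word.lower():
--         if not (char.isalpha() or char.isdigit()):
--             continue
--         if head is None:
--             head = char
--         elif char not in "aeiouy" and char != last:
--             sig.append(char)
--             last = char
--             if len(sig) == 6:
--                 break
--     return "" if head is None else head + "".join(sig)
-- ===== Notes on version B (the rewrite author's own statement) =====
-- stated objective: faster
-- what changed: A builds three intermediate lists (alnum filter, head/tail split with vowel filter, full collapse list) and truncates at the end; B is one fused single pass over word.lower() keeping head/last/sig state and breaking as soon as 6 signature consonants are collected.
import Mathlib
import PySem

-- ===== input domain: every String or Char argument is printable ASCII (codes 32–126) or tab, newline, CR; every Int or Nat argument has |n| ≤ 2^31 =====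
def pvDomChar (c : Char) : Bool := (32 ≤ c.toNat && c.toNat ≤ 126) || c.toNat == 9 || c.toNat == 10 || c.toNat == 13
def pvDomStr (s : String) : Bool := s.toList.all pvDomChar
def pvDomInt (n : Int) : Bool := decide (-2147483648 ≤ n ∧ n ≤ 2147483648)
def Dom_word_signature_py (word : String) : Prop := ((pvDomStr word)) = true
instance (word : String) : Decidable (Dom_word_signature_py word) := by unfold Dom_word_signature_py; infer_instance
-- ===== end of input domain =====

-- B replaces A's multi-pass pipeline (filter, head/tail split, vowel filter, collapse loop, truncate)
-- by one fused single pass over word.lower() with head/last/sig state and an early stop at 6 consonants; no intermediate lists (objective: faster, constant-factor, measured).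


-- shared character tests (char.isalpha() or char.isdigit(); char not in "aeiouy")
def wsAlnum (c : Char) : Bool := PySem.Chars.isalpha c || PySem.Chars.isdigit c
def wsCons (c : Char) : Bool := !("aeiouy".toList.contains c)

-- ===== PORT A =====
-- A: filter alnum of word.lower(); head = first; tail = non-vowels of the rest; collapse adjacent
-- duplicates with a foldl ('collapsed[-1]' = getLast?); return head + first 6 collapsed chars.
def word_signature_py (word : String) : String :=
  if word.toList = [] then "" else
  let chars := (PySem.Chars.lower word.toList).filter wsAlnum
  match chars with
  | [] => ""
  | head :: rest =>
    let tail := rest.filter wsCons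
    let collapsed := tail.foldl
      (fun acc c => if acc = [] ∨ acc.getLast? ≠ some c then acc ++ [c] else acc) []
    String.ofList (head :: collapsed.take 6)

-- ===== PORT B =====
-- B (Source B): one pass with state head : Option Char, last : Option Char, sig : List Char;
-- break as soon as sig reaches 6 chars.
def wsAltGo : List Char → Option Char → Option Char → List Char → String
  | [], head, _, sig =>
    match head with
    | none => ""
    | some h => String.ofList (h :: sig)
  | c :: rest, head, last, sig =>
    if wsAlnum c = false then
      wsAltGo rest head last sig
    else
      match head with
      | none => wsAltGo rest (some c) last sig
      | some h =>
        if wsCons c = true ∧ some c ≠ last then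
          let sig' := sig ++ [c]
          if sig'.length = 6 then String.ofList (h :: sig')
          else wsAltGo rest (some h) (some c) sig'
        else wsAltGo rest (some h) last sig

def word_signature_py_alt (word : String) : String :=
  wsAltGo (PySem.Chars.lower word.toList) none none []

-- ===== PRECONDITION & SPEC =====
def Spec_word_signature_py (word : String) (out : String) : Prop := out = word_signature_py_alt word
instance (word : String) (out : String) : Decidable (Spec_word_signature_py word out) := by unfold Spec_word_signature_py; infer_instance

-- ===== CLAIM (what is proved, stated in full; the proofs are below) =====
def Claim_equal_word_signature_py : Prop := ∀ (word : String), Dom_word_signature_py word → Spec_word_signature_py word (word_signature_py word)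

-- ===== LEMMAS AND PROOFS =====

-- proof-side characterisation of A's collapse loop
def wsCollapse (last : Option Char) : List Char → List Char
  | [] => []
  | c :: rest => if some c ≠ last then c :: wsCollapse (some c) rest else wsCollapse last rest

lemma ws_foldl_collapse (cs : List Char) (acc : List Char) :
    cs.foldl (fun acc c => if acc = [] ∨ acc.getLast? ≠ some c then acc ++ [c] else acc) acc
      = acc ++ wsCollapse acc.getLast? cs := by
  induction cs generalizing acc with
  | nil => simp [wsCollapse]
  | cons c rest ih =>
    have hcond : (acc = [] ∨ acc.getLast? ≠ some c) ↔ some c ≠ acc.getLast? := by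
      cases acc with
      | nil => simp
      | cons a as => simp [eq_comm]
    by_cases h : some c = acc.getLast?
    · simp only [List.foldl_cons, wsCollapse]
      rw [if_neg (by rw [hcond]; simp [h]), if_neg (by simp [h]), ih]
    · simp only [List.foldl_cons, wsCollapse]
      rw [if_pos (hcond.mpr h), if_pos h, ih]
      simp

lemma ws_go_some (cs : List Char) (h : Char) (last : Option Char) (sig : List Char)
    (hlen : sig.length < 6) :
    wsAltGo cs (some h) last sig
      = String.ofList (h :: (sig ++ wsCollapse last ((cs.filter wsAlnum).filter wsCons)).take 6) := by
  induction cs generalizing last sig with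
  | nil =>
    simp [wsAltGo, wsCollapse, List.take_of_length_le (Nat.le_of_lt hlen)]
  | cons c rest ih =>
    cases ha : wsAlnum c with
    | false =>
      simp only [wsAltGo]
      rw [if_pos ha, ih _ _ hlen]
      simp [ha]
    | true =>
      simp only [wsAltGo]
      rw [if_neg (by simp [ha])]
      have hfa : List.filter wsAlnum (c :: rest) = c :: List.filter wsAlnum rest := by
        simp [ha]
      rw [hfa]
      cases hv : wsCons c with
      | false =>
        rw [if_neg (by simp), ih _ _ hlen,
            show List.filter wsCons (c :: List.filter wsAlnum rest)
                = List.filter wsCons (List.filter wsAlnum rest) from by simp [hv]]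
      | true =>
        have hfc : List.filter wsCons (c :: List.filter wsAlnum rest)
            = c :: List.filter wsCons (List.filter wsAlnum rest) := by
          simp [hv]
        rw [hfc]
        by_cases hl : some c = last
        · rw [if_neg (by simp [hl]), ih _ _ hlen,
              show wsCollapse last (c :: List.filter wsCons (List.filter wsAlnum rest))
                  = wsCollapse last (List.filter wsCons (List.filter wsAlnum rest)) from by
                rw [wsCollapse, if_neg (by simp [hl])]]
        · rw [if_pos ⟨rfl, hl⟩,
              show wsCollapse last (c :: List.filter wsCons (List.filter wsAlnum rest))
                  = c :: wsCollapse (some c) (List.filter wsCons (List.filter wsAlnum rest)) from by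
                rw [wsCollapse, if_pos hl]]
          by_cases h6 : (sig ++ [c]).length = 6
          · rw [if_pos h6]
            have hr : sig ++ c :: wsCollapse (some c) ((rest.filter wsAlnum).filter wsCons)
                = (sig ++ [c]) ++ wsCollapse (some c) ((rest.filter wsAlnum).filter wsCons) := by
              simp
            rw [hr, List.take_append_of_le_length (by omega),
                List.take_of_length_le (by omega)]
          · rw [if_neg h6, ih _ _ (by simp at h6 ⊢; omega)]
            simp

lemma ws_go_none (cs : List Char) :
    wsAltGo cs none none []
      = match cs.filter wsAlnum with
        | [] => ""
        | head :: tl => String.ofList (head :: (wsCollapse none (tl.filter wsCons)).take 6) := by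
  induction cs with
  | nil => simp [wsAltGo]
  | cons c rest ih =>
    cases ha : wsAlnum c with
    | false =>
      simp only [wsAltGo]
      rw [if_pos ha, ih]
      simp [ha]
    | true =>
      simp only [wsAltGo]
      rw [if_neg (by simp [ha]),
          show List.filter wsAlnum (c :: rest) = c :: List.filter wsAlnum rest from by
            simp [ha]]
      exact ws_go_some rest c none [] (by simp)

-- ===== VERDICT (by name: the statement is the Claim_ definition above) =====
theorem word_signature_py_spec : Claim_equal_word_signature_py := by
  intro word _
  show word_signature_py word = word_signature_py_alt word
  unfold word_signature_py word_signature_py_alt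
  rw [ws_go_none]
  by_cases hw : word.toList = []
  · simp [hw, PySem.Chars.lower]
  · rw [if_neg hw]
    cases hfc : (PySem.Chars.lower word.toList).filter wsAlnum with
    | nil => rfl
    | cons head tl =>
      simp only []
      rw [ws_foldl_collapse]
      rfl
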